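-- pv_equiv track=rewrite | github.com/markjvillanueva3-cloud/PRISMV9 | SCRIPTS/materials_deep_accuracy.py | resolve_subcategory
-- ===== SOURCE A (Python) =====
-- def resolve_subcategory(mat: dict) -> str:
--     """Resolve the best subcategory for a material, normalizing variants."""
--     sc = mat.get("subcategory", "general")
--     if not sc or sc == "general":
--         # Try to infer from name or other fields
--         name = mat.get("name", "").upper()
--         iso = mat.get("iso_group", "")
--         mat_type = mat.get("material_type", "")
--
--         if iso == "P" or mat_type == "steel":
--             if any(x in name for x in ["1006","1008","1010","1012","1015","1018","1020"]):
--                 return "low_carbon_steel"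
--             if any(x in name for x in ["1040","1045","1050","1055"]):
--                 return "medium_carbon_steel"
--             if any(x in name for x in ["1060","1070","1080","1090","1095"]):
--                 return "high_carbon_steel"
--             if any(x in name for x in ["4130","4135","4140","4142","4145","4150"]):
--                 return "chromoly"
--             if any(x in name for x in ["4320","4330","4340","8620","8640"]):
--                 return "nickel_chromoly"
--             if any(x in name for x in ["5160","9260","SPRING"]):
--                 return "spring_steel"
--             if any(x in name for x in ["1117","1137","1141","1144","1212","1215","FREE"]):
--                 return "free_machining"
--             if any(x in name for x in ["52100","BEARING"]):
--                 return "bearing_steel"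
--             if any(x in name for x in ["A2 ","D2 ","O1 ","S7 ","W1 ","M2 ","M4 ","H13","H11","P20"]):
--                 return "tool_steel_hardened"
--         elif iso == "M":
--             if any(x in name for x in ["304","301","303","309","310","316","321","347","AUSTENITIC"]):
--                 return "austenitic"
--             if any(x in name for x in ["410","416","420","440","MARTENSITIC"]):
--                 return "martensitic"
--             if any(x in name for x in ["430","434","446","FERRITIC"]):
--                 return "ferritic"
--             if any(x in name for x in ["2205","2507","2304","DUPLEX"]):
--                 return "duplex"
--             if any(x in name for x in ["17-4","15-5","17-7","PH13","PH "]):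
--                 return "precipitation_hardening"
--         elif iso == "K":
--             if any(x in name for x in ["GRAY","GG","CLASS 20","CLASS 25","CLASS 30","CLASS 35","CLASS 40","GJL"]):
--                 return "gray_iron"
--             if any(x in name for x in ["DUCTILE","GGG","GJS","NODULAR","SPHEROIDAL"]):
--                 return "ductile_iron"
--             if any(x in name for x in ["CGI","COMPACTED","GJV","VERMICULAR"]):
--                 return "compacted_graphite"
--         elif iso == "N":
--             if any(x in name for x in ["ALUMINUM","ALUMINIUM","AL ","AA ","A356","A380"]):
--                 return "wrought_aluminum"
--             if "CAST" in name and "AL" in name: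
--                 return "aluminum_cast"
--             if "TI" in name or "TITANIUM" in name:
--                 return "titanium"
--
--     return sc
-- ===== SOURCE B (Python) =====
-- # B: instead of testing each keyword against the name (per-pattern substring search),
-- # scan the name ONCE: every window name[i:i+L] (L ranging over the distinct keyword
-- # lengths of the active group) is looked up in a hash set of the group's keywords,
-- # collecting the set of keywords that occur; then each rule fires iff enough of its
-- # keywords were found (need=1 for "any", need=2 for the CAST-and-AL conjunction).
--
-- def _compile(rules):
--     kws = {k for _, ks, _ in rules for k in ks}
--     lengths = sorted({len(k) for k in kws})
--     return rules, kws, lengths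
--
-- _TABLE = {
--     "P": _compile([
--         ("low_carbon_steel", ["1006","1008","1010","1012","1015","1018","1020"], 1),
--         ("medium_carbon_steel", ["1040","1045","1050","1055"], 1),
--         ("high_carbon_steel", ["1060","1070","1080","1090","1095"], 1),
--         ("chromoly", ["4130","4135","4140","4142","4145","4150"], 1),
--         ("nickel_chromoly", ["4320","4330","4340","8620","8640"], 1),
--         ("spring_steel", ["5160","9260","SPRING"], 1),
--         ("free_machining", ["1117","1137","1141","1144","1212","1215","FREE"], 1),
--         ("bearing_steel", ["52100","BEARING"], 1),
--         ("tool_steel_hardened", ["A2 ","D2 ","O1 ","S7 ","W1 ","M2 ","M4 ","H13","H11","P20"], 1),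
--     ]),
--     "M": _compile([
--         ("austenitic", ["304","301","303","309","310","316","321","347","AUSTENITIC"], 1),
--         ("martensitic", ["410","416","420","440","MARTENSITIC"], 1),
--         ("ferritic", ["430","434","446","FERRITIC"], 1),
--         ("duplex", ["2205","2507","2304","DUPLEX"], 1),
--         ("precipitation_hardening", ["17-4","15-5","17-7","PH13","PH "], 1),
--     ]),
--     "K": _compile([
--         ("gray_iron", ["GRAY","GG","CLASS 20","CLASS 25","CLASS 30","CLASS 35","CLASS 40","GJL"], 1),
--         ("ductile_iron", ["DUCTILE","GGG","GJS","NODULAR","SPHEROIDAL"], 1),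
--         ("compacted_graphite", ["CGI","COMPACTED","GJV","VERMICULAR"], 1),
--     ]),
--     "N": _compile([
--         ("wrought_aluminum", ["ALUMINUM","ALUMINIUM","AL ","AA ","A356","A380"], 1),
--         ("aluminum_cast", ["CAST","AL"], 2),
--         ("titanium", ["TI","TITANIUM"], 1),
--     ]),
-- }
--
-- def resolve_subcategory(mat: dict) -> str:
--     """Resolve the best subcategory for a material, normalizing variants."""
--     sc = mat.get("subcategory", "general")
--     if sc and sc != "general":
--         return sc
--     name = mat.get("name", "").upper()
--     iso = mat.get("iso_group", "")
--     key = "P" if (iso == "P" or mat.get("material_type", "") == "steel") else iso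
--     entry = _TABLE.get(key)
--     if entry is None:
--         return sc
--     rules, kws, lengths = entry
--     found = set()
--     for i in range(len(name)):
--         for L in lengths:
--             s = name[i:i+L]
--             if s in kws:
--                 found.add(s)
--     for label, ks, need in rules:
--         if sum(1 for k in ks if k in found) >= need:
--             return label
--     return sc
-- ===== Notes on version B (the rewrite author's own statement) =====
-- stated objective: alternative
-- what changed: Inverts the search direction: instead of testing every keyword for substring containment in the name, B scans the name once, looking up each window name[i:i+L] (L over the distinct keyword lengths) in a hash set of the active group's keywords, then fires the first rule whose required number of keywords was found.
import Mathlib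
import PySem

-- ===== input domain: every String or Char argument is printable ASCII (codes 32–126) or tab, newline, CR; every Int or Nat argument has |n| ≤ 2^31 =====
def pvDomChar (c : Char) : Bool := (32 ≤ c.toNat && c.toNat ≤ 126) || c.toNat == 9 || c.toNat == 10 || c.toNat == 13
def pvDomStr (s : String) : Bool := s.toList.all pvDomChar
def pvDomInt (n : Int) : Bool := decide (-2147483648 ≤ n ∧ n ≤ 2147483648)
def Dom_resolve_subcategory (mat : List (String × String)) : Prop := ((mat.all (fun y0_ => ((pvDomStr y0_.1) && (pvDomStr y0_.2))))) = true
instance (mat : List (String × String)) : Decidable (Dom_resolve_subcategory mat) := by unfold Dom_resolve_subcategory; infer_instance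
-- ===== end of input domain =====

-- B inverts the search: it scans the name once, looking up each window name[i:i+L] in a
-- hash set of the active group's keywords, instead of testing each keyword for containment.
-- ===== PORT A =====
def resolve_subcategory (mat : List (String × String)) : String :=
  let sc := PySem.Dict.getD (PySem.Dict.mk mat) "subcategory" "general"
  if sc = "" ∨ sc = "general" then
    let name := PySem.Str.upper (PySem.Dict.getD (PySem.Dict.mk mat) "name" "")
    let iso := PySem.Dict.getD (PySem.Dict.mk mat) "iso_group" ""
    let mat_type := PySem.Dict.getD (PySem.Dict.mk mat) "material_type" ""
    if iso = "P" ∨ mat_type = "steel" then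
      if ["1006", "1008", "1010", "1012", "1015", "1018", "1020"].any (fun x => PySem.Str.isIn x name) then "low_carbon_steel"
      else if ["1040", "1045", "1050", "1055"].any (fun x => PySem.Str.isIn x name) then "medium_carbon_steel"
      else if ["1060", "1070", "1080", "1090", "1095"].any (fun x => PySem.Str.isIn x name) then "high_carbon_steel"
      else if ["4130", "4135", "4140", "4142", "4145", "4150"].any (fun x => PySem.Str.isIn x name) then "chromoly"
      else if ["4320", "4330", "4340", "8620", "8640"].any (fun x => PySem.Str.isIn x name) then "nickel_chromoly"
      else if ["5160", "9260", "SPRING"].any (fun x => PySem.Str.isIn x name) then "spring_steel"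
      else if ["1117", "1137", "1141", "1144", "1212", "1215", "FREE"].any (fun x => PySem.Str.isIn x name) then "free_machining"
      else if ["52100", "BEARING"].any (fun x => PySem.Str.isIn x name) then "bearing_steel"
      else if ["A2 ", "D2 ", "O1 ", "S7 ", "W1 ", "M2 ", "M4 ", "H13", "H11", "P20"].any (fun x => PySem.Str.isIn x name) then "tool_steel_hardened"
      else sc
    else if iso = "M" then
      if ["304", "301", "303", "309", "310", "316", "321", "347", "AUSTENITIC"].any (fun x => PySem.Str.isIn x name) then "austenitic"
      else if ["410", "416", "420", "440", "MARTENSITIC"].any (fun x => PySem.Str.isIn x name) then "martensitic"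
      else if ["430", "434", "446", "FERRITIC"].any (fun x => PySem.Str.isIn x name) then "ferritic"
      else if ["2205", "2507", "2304", "DUPLEX"].any (fun x => PySem.Str.isIn x name) then "duplex"
      else if ["17-4", "15-5", "17-7", "PH13", "PH "].any (fun x => PySem.Str.isIn x name) then "precipitation_hardening"
      else sc
    else if iso = "K" then
      if ["GRAY", "GG", "CLASS 20", "CLASS 25", "CLASS 30", "CLASS 35", "CLASS 40", "GJL"].any (fun x => PySem.Str.isIn x name) then "gray_iron"
      else if ["DUCTILE", "GGG", "GJS", "NODULAR", "SPHEROIDAL"].any (fun x => PySem.Str.isIn x name) then "ductile_iron"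
      else if ["CGI", "COMPACTED", "GJV", "VERMICULAR"].any (fun x => PySem.Str.isIn x name) then "compacted_graphite"
      else sc
    else if iso = "N" then
      if ["ALUMINUM", "ALUMINIUM", "AL ", "AA ", "A356", "A380"].any (fun x => PySem.Str.isIn x name) then "wrought_aluminum"
      else if PySem.Str.isIn "CAST" name && PySem.Str.isIn "AL" name then "aluminum_cast"
      else if PySem.Str.isIn "TI" name || PySem.Str.isIn "TITANIUM" name then "titanium"
      else sc
    else sc
  else sc

-- ===== PORT B =====
-- _compile(rules): the rules plus the hash set of their keywords and the sorted distinct keyword lengths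
def pvCompile (rules : List (String × List String × Nat)) :
    List (String × List String × Nat) × PySem.Set String × List Int :=
  let kws : PySem.Set String := PySem.Set.ofList (rules.flatMap (fun r => r.2.1))
  let lengths : List Int :=
    PySem.List.sorted (PySem.Set.ofList (kws.map (fun k => PySem.Str.len k))) (fun x => x) false
  (rules, kws, lengths)

def pvTable : PySem.Dict String (List (String × List String × Nat) × PySem.Set String × List Int) :=
  PySem.Dict.mk
    [("P", pvCompile
        [("low_carbon_steel", ["1006", "1008", "1010", "1012", "1015", "1018", "1020"], 1),
         ("medium_carbon_steel", ["1040", "1045", "1050", "1055"], 1),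
         ("high_carbon_steel", ["1060", "1070", "1080", "1090", "1095"], 1),
         ("chromoly", ["4130", "4135", "4140", "4142", "4145", "4150"], 1),
         ("nickel_chromoly", ["4320", "4330", "4340", "8620", "8640"], 1),
         ("spring_steel", ["5160", "9260", "SPRING"], 1),
         ("free_machining", ["1117", "1137", "1141", "1144", "1212", "1215", "FREE"], 1),
         ("bearing_steel", ["52100", "BEARING"], 1),
         ("tool_steel_hardened", ["A2 ", "D2 ", "O1 ", "S7 ", "W1 ", "M2 ", "M4 ", "H13", "H11", "P20"], 1)]),
     ("M", pvCompile
        [("austenitic", ["304", "301", "303", "309", "310", "316", "321", "347", "AUSTENITIC"], 1),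
         ("martensitic", ["410", "416", "420", "440", "MARTENSITIC"], 1),
         ("ferritic", ["430", "434", "446", "FERRITIC"], 1),
         ("duplex", ["2205", "2507", "2304", "DUPLEX"], 1),
         ("precipitation_hardening", ["17-4", "15-5", "17-7", "PH13", "PH "], 1)]),
     ("K", pvCompile
        [("gray_iron", ["GRAY", "GG", "CLASS 20", "CLASS 25", "CLASS 30", "CLASS 35", "CLASS 40", "GJL"], 1),
         ("ductile_iron", ["DUCTILE", "GGG", "GJS", "NODULAR", "SPHEROIDAL"], 1),
         ("compacted_graphite", ["CGI", "COMPACTED", "GJV", "VERMICULAR"], 1)]),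
     ("N", pvCompile
        [("wrought_aluminum", ["ALUMINUM", "ALUMINIUM", "AL ", "AA ", "A356", "A380"], 1),
         ("aluminum_cast", ["CAST", "AL"], 2),
         ("titanium", ["TI", "TITANIUM"], 1)])]

-- the window scan: found = { name[i:i+L] | i < len(name), L in lengths } ∩ kws
def pvFindMatches (name : String) (kws : PySem.Set String) (lengths : List Int) : PySem.Set String :=
  (PySem.List.pyRange 0 (PySem.Str.len name) 1).foldl
    (fun acc i => lengths.foldl
      (fun acc2 L =>
        let s := PySem.Str.slice name (some i) (some (i + L))
        if PySem.Set.contains kws s then PySem.Set.add acc2 s else acc2) acc)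
    PySem.Set.empty

-- first rule with enough keywords found
def pvApplyRules (found : PySem.Set String) (sc : String) :
    List (String × List String × Nat) → String
  | [] => sc
  | (label, ks, need) :: rest =>
      if need ≤ ks.countP (fun k => PySem.Set.contains found k) then label
      else pvApplyRules found sc rest

def resolve_subcategory_alt (mat : List (String × String)) : String :=
  let sc := PySem.Dict.getD (PySem.Dict.mk mat) "subcategory" "general"
  if sc ≠ "" ∧ sc ≠ "general" then sc
  else
    let name := PySem.Str.upper (PySem.Dict.getD (PySem.Dict.mk mat) "name" "")
    let iso := PySem.Dict.getD (PySem.Dict.mk mat) "iso_group" ""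
    let key := if iso = "P" ∨ PySem.Dict.getD (PySem.Dict.mk mat) "material_type" "" = "steel" then "P" else iso
    match PySem.Dict.get? pvTable key with
    | none => sc
    | some (rules, kws, lengths) => pvApplyRules (pvFindMatches name kws lengths) sc rules

-- ===== PRECONDITION & SPEC =====
def Spec_resolve_subcategory (mat : List (String × String)) (out : String) : Prop := out = resolve_subcategory_alt mat
instance (mat : List (String × String)) (out : String) : Decidable (Spec_resolve_subcategory mat out) := by unfold Spec_resolve_subcategory; infer_instance

-- ===== CLAIM (what is proved, stated in full; the proofs are below) =====
def Claim_equal_resolve_subcategory : Prop := ∀ (mat : List (String × String)), Dom_resolve_subcategory mat → Spec_resolve_subcategory mat (resolve_subcategory mat)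

-- ===== LEMMAS AND PROOFS =====

-- proof-side names for the literal rule tables
def pvRP : List (String × List String × Nat) :=
  [("low_carbon_steel", ["1006", "1008", "1010", "1012", "1015", "1018", "1020"], 1),
   ("medium_carbon_steel", ["1040", "1045", "1050", "1055"], 1),
   ("high_carbon_steel", ["1060", "1070", "1080", "1090", "1095"], 1),
   ("chromoly", ["4130", "4135", "4140", "4142", "4145", "4150"], 1),
   ("nickel_chromoly", ["4320", "4330", "4340", "8620", "8640"], 1),
   ("spring_steel", ["5160", "9260", "SPRING"], 1),
   ("free_machining", ["1117", "1137", "1141", "1144", "1212", "1215", "FREE"], 1),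
   ("bearing_steel", ["52100", "BEARING"], 1),
   ("tool_steel_hardened", ["A2 ", "D2 ", "O1 ", "S7 ", "W1 ", "M2 ", "M4 ", "H13", "H11", "P20"], 1)]
def pvRM : List (String × List String × Nat) :=
  [("austenitic", ["304", "301", "303", "309", "310", "316", "321", "347", "AUSTENITIC"], 1),
   ("martensitic", ["410", "416", "420", "440", "MARTENSITIC"], 1),
   ("ferritic", ["430", "434", "446", "FERRITIC"], 1),
   ("duplex", ["2205", "2507", "2304", "DUPLEX"], 1),
   ("precipitation_hardening", ["17-4", "15-5", "17-7", "PH13", "PH "], 1)]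
def pvRK : List (String × List String × Nat) :=
  [("gray_iron", ["GRAY", "GG", "CLASS 20", "CLASS 25", "CLASS 30", "CLASS 35", "CLASS 40", "GJL"], 1),
   ("ductile_iron", ["DUCTILE", "GGG", "GJS", "NODULAR", "SPHEROIDAL"], 1),
   ("compacted_graphite", ["CGI", "COMPACTED", "GJV", "VERMICULAR"], 1)]
def pvRN : List (String × List String × Nat) :=
  [("wrought_aluminum", ["ALUMINUM", "ALUMINIUM", "AL ", "AA ", "A356", "A380"], 1),
   ("aluminum_cast", ["CAST", "AL"], 2),
   ("titanium", ["TI", "TITANIUM"], 1)]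

-- membership in a fold that only ever adds elements (step characterized by Q)
theorem pv_mem_foldl {α : Type} (step : PySem.Set String → α → PySem.Set String)
    (Q : α → String → Prop)
    (hstep : ∀ acc i y, y ∈ step acc i ↔ y ∈ acc ∨ Q i y) :
    ∀ (xs : List α) (acc : PySem.Set String) (y : String),
      y ∈ xs.foldl step acc ↔ y ∈ acc ∨ ∃ i ∈ xs, Q i y := by
  intro xs
  induction xs with
  | nil => intro acc y; simp
  | cons x xs ih =>
    intro acc y
    rw [List.foldl_cons, ih, hstep]
    simp only [List.mem_cons]
    constructor
    · rintro ((h | h) | ⟨i, hi, h⟩)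
      · exact Or.inl h
      · exact Or.inr ⟨x, Or.inl rfl, h⟩
      · exact Or.inr ⟨i, Or.inr hi, h⟩
    · rintro (h | ⟨i, (rfl | hi), h⟩)
      · exact Or.inl (Or.inl h)
      · exact Or.inl (Or.inr h)
      · exact Or.inr ⟨i, hi, h⟩

theorem pv_mem_findMatches (name : String) (kws : PySem.Set String) (lengths : List Int) (y : String) :
    y ∈ pvFindMatches name kws lengths ↔
      ∃ i ∈ PySem.List.pyRange 0 (PySem.Str.len name) 1, ∃ L ∈ lengths,
        PySem.Set.contains kws (PySem.Str.slice name (some i) (some (i + L))) = true ∧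
        PySem.Str.slice name (some i) (some (i + L)) = y := by
  unfold pvFindMatches
  rw [pv_mem_foldl _
      (fun i y => ∃ L ∈ lengths,
        PySem.Set.contains kws (PySem.Str.slice name (some i) (some (i + L))) = true ∧
        PySem.Str.slice name (some i) (some (i + L)) = y)
      (fun acc i y => by
        rw [pv_mem_foldl _
            (fun L y => PySem.Set.contains kws (PySem.Str.slice name (some i) (some (i + L))) = true ∧
              PySem.Str.slice name (some i) (some (i + L)) = y)
            (fun acc2 L y => by
              by_cases h : PySem.Set.contains kws (PySem.Str.slice name (some i) (some (i + L))) = true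
              · simp only [if_pos h, PySem.Set.mem_add]
                constructor
                · rintro (hy | rfl)
                  · exact Or.inl hy
                  · exact Or.inr ⟨h, rfl⟩
                · rintro (hy | ⟨_, rfl⟩)
                  · exact Or.inl hy
                  · exact Or.inr rfl
              · simp only [if_neg h]
                constructor
                · exact Or.inl
                · rintro (hy | ⟨hc, _⟩)
                  · exact hy
                  · exact absurd hc h)])]
  simp [PySem.Set.empty]

theorem pv_contains_iff (s : PySem.Set String) (x : String) :
    PySem.Set.contains s x = true ↔ x ∈ s := by
  simp [PySem.Set.contains]

theorem pv_contains_findMatches (name kw : String) (kws : PySem.Set String) (lengths : List Int)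
    (hL : ∀ L ∈ lengths, 0 ≤ L)
    (hk : kw ∈ kws)
    (hlen : ((kw.toList.length : Int)) ∈ lengths)
    (hne : kw.toList ≠ []) :
    PySem.Set.contains (pvFindMatches name kws lengths) kw = PySem.Str.isIn kw name := by
  rw [Bool.eq_iff_iff, pv_contains_iff, pv_mem_findMatches, PySem.Str.isIn_iff_infix]
  constructor
  · rintro ⟨i, hi, L, hLmem, _, hsl⟩
    rw [PySem.List.mem_pyRange_one] at hi
    have h0i : 0 ≤ i := hi.1
    have h0L : 0 ≤ L := hL L hLmem
    have : (PySem.Str.slice name (some i) (some (i + L))).toList =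
        (name.toList.drop i.toNat).take ((i + L).toNat - i.toNat) := by
      rw [PySem.Str.toList_slice, PySem.Chars.slice_eq_listSlice, PySem.List.slice_toNat _ h0i (by omega)]
    rw [← hsl, this]
    exact ((List.take_prefix _ _).isInfix).trans (List.drop_suffix _ _).isInfix
  · intro hinf
    have : ∃ j, kw.toList <+: name.toList.drop j := by
      rw [PySem.Chars.exists_prefix_drop_iff_isIn]
      rw [PySem.Chars.isIn_iff_infix]
      exact hinf
    obtain ⟨j, hj⟩ := this
    have hjlt : j < name.toList.length := by
      by_contra hge
      rw [List.drop_eq_nil_iff.mpr (by omega)] at hj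
      exact hne (List.prefix_nil.mp hj)
    have htake : kw.toList = (name.toList.drop j).take kw.toList.length :=
      List.prefix_iff_eq_take.mp hj
    refine ⟨(j : Int), ?_, (kw.toList.length : Int), hlen, ?_, ?_⟩
    · rw [PySem.List.mem_pyRange_one]
      constructor
      · exact Int.natCast_nonneg j
      · have hl : PySem.Str.len name = (name.toList.length : Int) := rfl
        rw [hl]
        exact_mod_cast hjlt
    · rw [pv_contains_iff]
      have hs : PySem.Str.slice name (some (j : Int)) (some ((j : Int) + (kw.toList.length : Int))) = kw := by
        rw [← String.toList_inj, PySem.Str.toList_slice, PySem.Chars.slice_eq_listSlice, PySem.List.slice_natCast_add, ← htake]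
      rw [hs]; exact hk
    · rw [← String.toList_inj, PySem.Str.toList_slice, PySem.Chars.slice_eq_listSlice, PySem.List.slice_natCast_add, ← htake]

theorem pv_one_le_countP (p : String → Bool) (ks : List String) :
    (1 ≤ ks.countP p) ↔ ks.any p = true := by
  rw [List.any_eq_true, ← List.countP_pos_iff]
  omega

theorem pv_two_le_countP (p : String → Bool) :
    (2 ≤ (["CAST", "AL"] : List String).countP p) ↔ (p "CAST" && p "AL") = true := by
  cases h1 : p "CAST" <;> cases h2 : p "AL" <;>
    simp [h1, h2]
-- per-group closed facts (evaluated by decide)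
set_option maxRecDepth 100000 in
theorem pv_hLP : ∀ L ∈ (pvCompile pvRP).2.2, 0 ≤ L := by decide
set_option maxRecDepth 100000 in
theorem pv_hLM : ∀ L ∈ (pvCompile pvRM).2.2, 0 ≤ L := by decide
set_option maxRecDepth 100000 in
theorem pv_hLK : ∀ L ∈ (pvCompile pvRK).2.2, 0 ≤ L := by decide
set_option maxRecDepth 100000 in
theorem pv_hLN : ∀ L ∈ (pvCompile pvRN).2.2, 0 ≤ L := by decide
set_option maxRecDepth 100000 in
theorem pv_hfP : ∀ k ∈ pvRP.flatMap (fun r => r.2.1),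
    k ∈ (pvCompile pvRP).2.1 ∧ ((k.toList.length : Int)) ∈ (pvCompile pvRP).2.2 ∧ k.toList ≠ [] := by decide
set_option maxRecDepth 100000 in
theorem pv_hfM : ∀ k ∈ pvRM.flatMap (fun r => r.2.1),
    k ∈ (pvCompile pvRM).2.1 ∧ ((k.toList.length : Int)) ∈ (pvCompile pvRM).2.2 ∧ k.toList ≠ [] := by decide
set_option maxRecDepth 100000 in
theorem pv_hfK : ∀ k ∈ pvRK.flatMap (fun r => r.2.1),
    k ∈ (pvCompile pvRK).2.1 ∧ ((k.toList.length : Int)) ∈ (pvCompile pvRK).2.2 ∧ k.toList ≠ [] := by decide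
set_option maxRecDepth 100000 in
theorem pv_hfN : ∀ k ∈ pvRN.flatMap (fun r => r.2.1),
    k ∈ (pvCompile pvRN).2.1 ∧ ((k.toList.length : Int)) ∈ (pvCompile pvRN).2.2 ∧ k.toList ≠ [] := by decide

theorem pv_groupP (name sc : String) (found : PySem.Set String)
    (hf : ∀ k ∈ pvRP.flatMap (fun r => r.2.1), PySem.Set.contains found k = PySem.Str.isIn k name) :
    pvApplyRules found sc pvRP =
      (if ["1006", "1008", "1010", "1012", "1015", "1018", "1020"].any (fun x => PySem.Str.isIn x name) then "low_carbon_steel"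
      else if ["1040", "1045", "1050", "1055"].any (fun x => PySem.Str.isIn x name) then "medium_carbon_steel"
      else if ["1060", "1070", "1080", "1090", "1095"].any (fun x => PySem.Str.isIn x name) then "high_carbon_steel"
      else if ["4130", "4135", "4140", "4142", "4145", "4150"].any (fun x => PySem.Str.isIn x name) then "chromoly"
      else if ["4320", "4330", "4340", "8620", "8640"].any (fun x => PySem.Str.isIn x name) then "nickel_chromoly"
      else if ["5160", "9260", "SPRING"].any (fun x => PySem.Str.isIn x name) then "spring_steel"
      else if ["1117", "1137", "1141", "1144", "1212", "1215", "FREE"].any (fun x => PySem.Str.isIn x name) then "free_machining"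
      else if ["52100", "BEARING"].any (fun x => PySem.Str.isIn x name) then "bearing_steel"
      else if ["A2 ", "D2 ", "O1 ", "S7 ", "W1 ", "M2 ", "M4 ", "H13", "H11", "P20"].any (fun x => PySem.Str.isIn x name) then "tool_steel_hardened"
      else sc) := by
  have hc : ∀ ks : List String, (∀ k ∈ ks, k ∈ pvRP.flatMap (fun r => r.2.1)) →
      ks.countP (fun k => PySem.Set.contains found k) = ks.countP (fun k => PySem.Str.isIn k name) :=
    fun ks hs => List.countP_congr (fun k hk => by rw [hf k (hs k hk)])
  simp only [pvRP, pvApplyRules]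
  rw [hc ["1006", "1008", "1010", "1012", "1015", "1018", "1020"] (by decide),
      hc ["1040", "1045", "1050", "1055"] (by decide),
      hc ["1060", "1070", "1080", "1090", "1095"] (by decide),
      hc ["4130", "4135", "4140", "4142", "4145", "4150"] (by decide),
      hc ["4320", "4330", "4340", "8620", "8640"] (by decide),
      hc ["5160", "9260", "SPRING"] (by decide),
      hc ["1117", "1137", "1141", "1144", "1212", "1215", "FREE"] (by decide),
      hc ["52100", "BEARING"] (by decide),
      hc ["A2 ", "D2 ", "O1 ", "S7 ", "W1 ", "M2 ", "M4 ", "H13", "H11", "P20"] (by decide)]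
  simp only [pv_one_le_countP]

theorem pv_groupM (name sc : String) (found : PySem.Set String)
    (hf : ∀ k ∈ pvRM.flatMap (fun r => r.2.1), PySem.Set.contains found k = PySem.Str.isIn k name) :
    pvApplyRules found sc pvRM =
      (if ["304", "301", "303", "309", "310", "316", "321", "347", "AUSTENITIC"].any (fun x => PySem.Str.isIn x name) then "austenitic"
      else if ["410", "416", "420", "440", "MARTENSITIC"].any (fun x => PySem.Str.isIn x name) then "martensitic"
      else if ["430", "434", "446", "FERRITIC"].any (fun x => PySem.Str.isIn x name) then "ferritic"
      else if ["2205", "2507", "2304", "DUPLEX"].any (fun x => PySem.Str.isIn x name) then "duplex"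
      else if ["17-4", "15-5", "17-7", "PH13", "PH "].any (fun x => PySem.Str.isIn x name) then "precipitation_hardening"
      else sc) := by
  have hc : ∀ ks : List String, (∀ k ∈ ks, k ∈ pvRM.flatMap (fun r => r.2.1)) →
      ks.countP (fun k => PySem.Set.contains found k) = ks.countP (fun k => PySem.Str.isIn k name) :=
    fun ks hs => List.countP_congr (fun k hk => by rw [hf k (hs k hk)])
  simp only [pvRM, pvApplyRules]
  rw [hc ["304", "301", "303", "309", "310", "316", "321", "347", "AUSTENITIC"] (by decide),
      hc ["410", "416", "420", "440", "MARTENSITIC"] (by decide),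
      hc ["430", "434", "446", "FERRITIC"] (by decide),
      hc ["2205", "2507", "2304", "DUPLEX"] (by decide),
      hc ["17-4", "15-5", "17-7", "PH13", "PH "] (by decide)]
  simp only [pv_one_le_countP]

theorem pv_groupK (name sc : String) (found : PySem.Set String)
    (hf : ∀ k ∈ pvRK.flatMap (fun r => r.2.1), PySem.Set.contains found k = PySem.Str.isIn k name) :
    pvApplyRules found sc pvRK =
      (if ["GRAY", "GG", "CLASS 20", "CLASS 25", "CLASS 30", "CLASS 35", "CLASS 40", "GJL"].any (fun x => PySem.Str.isIn x name) then "gray_iron"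
      else if ["DUCTILE", "GGG", "GJS", "NODULAR", "SPHEROIDAL"].any (fun x => PySem.Str.isIn x name) then "ductile_iron"
      else if ["CGI", "COMPACTED", "GJV", "VERMICULAR"].any (fun x => PySem.Str.isIn x name) then "compacted_graphite"
      else sc) := by
  have hc : ∀ ks : List String, (∀ k ∈ ks, k ∈ pvRK.flatMap (fun r => r.2.1)) →
      ks.countP (fun k => PySem.Set.contains found k) = ks.countP (fun k => PySem.Str.isIn k name) :=
    fun ks hs => List.countP_congr (fun k hk => by rw [hf k (hs k hk)])
  simp only [pvRK, pvApplyRules]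
  rw [hc ["GRAY", "GG", "CLASS 20", "CLASS 25", "CLASS 30", "CLASS 35", "CLASS 40", "GJL"] (by decide),
      hc ["DUCTILE", "GGG", "GJS", "NODULAR", "SPHEROIDAL"] (by decide),
      hc ["CGI", "COMPACTED", "GJV", "VERMICULAR"] (by decide)]
  simp only [pv_one_le_countP]

theorem pv_groupN (name sc : String) (found : PySem.Set String)
    (hf : ∀ k ∈ pvRN.flatMap (fun r => r.2.1), PySem.Set.contains found k = PySem.Str.isIn k name) :
    pvApplyRules found sc pvRN =
      (if ["ALUMINUM", "ALUMINIUM", "AL ", "AA ", "A356", "A380"].any (fun x => PySem.Str.isIn x name) then "wrought_aluminum"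
      else if PySem.Str.isIn "CAST" name && PySem.Str.isIn "AL" name then "aluminum_cast"
      else if PySem.Str.isIn "TI" name || PySem.Str.isIn "TITANIUM" name then "titanium"
      else sc) := by
  have hc : ∀ ks : List String, (∀ k ∈ ks, k ∈ pvRN.flatMap (fun r => r.2.1)) →
      ks.countP (fun k => PySem.Set.contains found k) = ks.countP (fun k => PySem.Str.isIn k name) :=
    fun ks hs => List.countP_congr (fun k hk => by rw [hf k (hs k hk)])
  have hTI : (1 ≤ (["TI", "TITANIUM"] : List String).countP (fun k => PySem.Str.isIn k name)) ↔
      (PySem.Str.isIn "TI" name || PySem.Str.isIn "TITANIUM" name) = true := by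
    rw [pv_one_le_countP]; simp
  simp only [pvRN, pvApplyRules]
  rw [hc ["ALUMINUM", "ALUMINIUM", "AL ", "AA ", "A356", "A380"] (by decide),
      hc ["CAST", "AL"] (by decide),
      hc ["TI", "TITANIUM"] (by decide)]
  simp only [pv_two_le_countP, hTI, pv_one_le_countP]
set_option maxRecDepth 100000 in
theorem pv_keysTable : PySem.Dict.keys pvTable = ["P", "M", "K", "N"] := by decide

set_option maxRecDepth 100000 in
theorem pv_core (sc name iso mt : String) :
  (if sc = "" ∨ sc = "general" then
    if iso = "P" ∨ mt = "steel" then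
      if ["1006", "1008", "1010", "1012", "1015", "1018", "1020"].any (fun x => PySem.Str.isIn x name) then "low_carbon_steel"
      else if ["1040", "1045", "1050", "1055"].any (fun x => PySem.Str.isIn x name) then "medium_carbon_steel"
      else if ["1060", "1070", "1080", "1090", "1095"].any (fun x => PySem.Str.isIn x name) then "high_carbon_steel"
      else if ["4130", "4135", "4140", "4142", "4145", "4150"].any (fun x => PySem.Str.isIn x name) then "chromoly"
      else if ["4320", "4330", "4340", "8620", "8640"].any (fun x => PySem.Str.isIn x name) then "nickel_chromoly"
      else if ["5160", "9260", "SPRING"].any (fun x => PySem.Str.isIn x name) then "spring_steel"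
      else if ["1117", "1137", "1141", "1144", "1212", "1215", "FREE"].any (fun x => PySem.Str.isIn x name) then "free_machining"
      else if ["52100", "BEARING"].any (fun x => PySem.Str.isIn x name) then "bearing_steel"
      else if ["A2 ", "D2 ", "O1 ", "S7 ", "W1 ", "M2 ", "M4 ", "H13", "H11", "P20"].any (fun x => PySem.Str.isIn x name) then "tool_steel_hardened"
      else sc
    else if iso = "M" then
      if ["304", "301", "303", "309", "310", "316", "321", "347", "AUSTENITIC"].any (fun x => PySem.Str.isIn x name) then "austenitic"
      else if ["410", "416", "420", "440", "MARTENSITIC"].any (fun x => PySem.Str.isIn x name) then "martensitic"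
      else if ["430", "434", "446", "FERRITIC"].any (fun x => PySem.Str.isIn x name) then "ferritic"
      else if ["2205", "2507", "2304", "DUPLEX"].any (fun x => PySem.Str.isIn x name) then "duplex"
      else if ["17-4", "15-5", "17-7", "PH13", "PH "].any (fun x => PySem.Str.isIn x name) then "precipitation_hardening"
      else sc
    else if iso = "K" then
      if ["GRAY", "GG", "CLASS 20", "CLASS 25", "CLASS 30", "CLASS 35", "CLASS 40", "GJL"].any (fun x => PySem.Str.isIn x name) then "gray_iron"
      else if ["DUCTILE", "GGG", "GJS", "NODULAR", "SPHEROIDAL"].any (fun x => PySem.Str.isIn x name) then "ductile_iron"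
      else if ["CGI", "COMPACTED", "GJV", "VERMICULAR"].any (fun x => PySem.Str.isIn x name) then "compacted_graphite"
      else sc
    else if iso = "N" then
      if ["ALUMINUM", "ALUMINIUM", "AL ", "AA ", "A356", "A380"].any (fun x => PySem.Str.isIn x name) then "wrought_aluminum"
      else if PySem.Str.isIn "CAST" name && PySem.Str.isIn "AL" name then "aluminum_cast"
      else if PySem.Str.isIn "TI" name || PySem.Str.isIn "TITANIUM" name then "titanium"
      else sc
    else sc
  else sc)
  = (if sc ≠ "" ∧ sc ≠ "general" then sc
     else match PySem.Dict.get? pvTable (if iso = "P" ∨ mt = "steel" then "P" else iso) with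
          | none => sc
          | some (rules, kws, lengths) => pvApplyRules (pvFindMatches name kws lengths) sc rules) := by
  by_cases h0 : sc = "" ∨ sc = "general"
  · rw [if_pos h0, if_neg (by tauto : ¬(sc ≠ "" ∧ sc ≠ "general"))]
    by_cases hp : iso = "P" ∨ mt = "steel"
    · rw [if_pos hp, if_pos hp,
          show PySem.Dict.get? pvTable "P" = some (pvCompile pvRP) from by decide]
      have hf : ∀ k ∈ pvRP.flatMap (fun r => r.2.1),
          PySem.Set.contains (pvFindMatches name (pvCompile pvRP).2.1 (pvCompile pvRP).2.2) k = PySem.Str.isIn k name :=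
        fun k hk => pv_contains_findMatches name k _ _ pv_hLP (pv_hfP k hk).1 (pv_hfP k hk).2.1 (pv_hfP k hk).2.2
      exact (pv_groupP name sc _ hf).symm
    · rw [if_neg hp, if_neg hp]
      have hP : ¬ iso = "P" := fun h => hp (Or.inl h)
      by_cases hM : iso = "M"
      · subst hM
        rw [if_pos rfl, show PySem.Dict.get? pvTable "M" = some (pvCompile pvRM) from by decide]
        have hf : ∀ k ∈ pvRM.flatMap (fun r => r.2.1),
            PySem.Set.contains (pvFindMatches name (pvCompile pvRM).2.1 (pvCompile pvRM).2.2) k = PySem.Str.isIn k name :=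
          fun k hk => pv_contains_findMatches name k _ _ pv_hLM (pv_hfM k hk).1 (pv_hfM k hk).2.1 (pv_hfM k hk).2.2
        exact (pv_groupM name sc _ hf).symm
      · rw [if_neg hM]
        by_cases hK : iso = "K"
        · subst hK
          rw [if_pos rfl, show PySem.Dict.get? pvTable "K" = some (pvCompile pvRK) from by decide]
          have hf : ∀ k ∈ pvRK.flatMap (fun r => r.2.1),
              PySem.Set.contains (pvFindMatches name (pvCompile pvRK).2.1 (pvCompile pvRK).2.2) k = PySem.Str.isIn k name :=
            fun k hk => pv_contains_findMatches name k _ _ pv_hLK (pv_hfK k hk).1 (pv_hfK k hk).2.1 (pv_hfK k hk).2.2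
          exact (pv_groupK name sc _ hf).symm
        · rw [if_neg hK]
          by_cases hN : iso = "N"
          · subst hN
            rw [if_pos rfl, show PySem.Dict.get? pvTable "N" = some (pvCompile pvRN) from by decide]
            have hf : ∀ k ∈ pvRN.flatMap (fun r => r.2.1),
                PySem.Set.contains (pvFindMatches name (pvCompile pvRN).2.1 (pvCompile pvRN).2.2) k = PySem.Str.isIn k name :=
              fun k hk => pv_contains_findMatches name k _ _ pv_hLN (pv_hfN k hk).1 (pv_hfN k hk).2.1 (pv_hfN k hk).2.2
            exact (pv_groupN name sc _ hf).symm
          · rw [if_neg hN]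
            have hnone : PySem.Dict.get? pvTable iso = none := by
              rw [PySem.Dict.get?_eq_none_iff_not_mem_keys, pv_keysTable]
              simp [hP, hM, hK, hN]
            rw [hnone]
  · rw [if_neg h0, if_pos (by tauto : sc ≠ "" ∧ sc ≠ "general")]

theorem pv_final : ∀ (mat : List (String × String)),
    resolve_subcategory mat = resolve_subcategory_alt mat := by
  intro mat
  exact pv_core (PySem.Dict.getD (PySem.Dict.mk mat) "subcategory" "general")
    (PySem.Str.upper (PySem.Dict.getD (PySem.Dict.mk mat) "name" ""))
    (PySem.Dict.getD (PySem.Dict.mk mat) "iso_group" "")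
    (PySem.Dict.getD (PySem.Dict.mk mat) "material_type" "")

-- ===== VERDICT (by name: the statement is the Claim_ definition above) =====
theorem resolve_subcategory_spec : Claim_equal_resolve_subcategory := by
  intro mat _
  show resolve_subcategory mat = resolve_subcategory_alt mat
  exact pv_final mat
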